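-- pv_equiv track=rewrite | github.com/mstan/snesrecomp | tools/sneslib/commands/align.py | _extract_mode_transitions
-- ===== SOURCE A (Python) =====
-- def _extract_mode_transitions(frames):
--     transitions = []
--     prev_mode = None
--     for f in sorted(frames.keys()):
--         mode = frames[f].get('mode', '?')
--         if mode != prev_mode:
--             transitions.append((f, mode))
--             prev_mode = mode
--     return transitions
-- ===== SOURCE B (Python) =====
-- def _extract_mode_transitions(frames):
--     pairs = [(f, frames[f].get('mode', '?')) for f in sorted(frames)]
--     out = []
--     i, n = 0, len(pairs)
--     while i < n:
--         f, m = pairs[i]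
--         out.append((f, m))
--         j = i + 1
--         while j < n and pairs[j][1] == m:
--             j += 1
--         i = j
--     return out
-- ===== Notes on version B (the rewrite author's own statement) =====
-- stated objective: alternative
-- what changed: Replaces A's single pass carrying a prev_mode accumulator with a run-skipping formulation: map sorted keys to (key, mode) pairs, then an outer loop emits the head of each maximal run of equal modes while an inner loop skips the rest of the run.
import Mathlib
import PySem

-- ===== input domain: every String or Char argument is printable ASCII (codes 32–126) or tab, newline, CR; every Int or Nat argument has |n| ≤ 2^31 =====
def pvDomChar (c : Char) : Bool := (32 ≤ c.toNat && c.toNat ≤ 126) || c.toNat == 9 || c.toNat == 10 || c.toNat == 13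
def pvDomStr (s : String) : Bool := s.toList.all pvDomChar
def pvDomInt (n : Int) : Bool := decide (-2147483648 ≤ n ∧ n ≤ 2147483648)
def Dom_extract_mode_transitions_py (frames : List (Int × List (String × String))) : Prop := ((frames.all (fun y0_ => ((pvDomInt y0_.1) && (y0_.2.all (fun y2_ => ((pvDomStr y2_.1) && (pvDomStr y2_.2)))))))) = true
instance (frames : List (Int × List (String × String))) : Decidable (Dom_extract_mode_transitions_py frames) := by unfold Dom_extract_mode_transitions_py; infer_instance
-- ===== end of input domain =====

-- B replaces A's single pass with a prev-mode accumulator by mapping keys to (key, mode)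
-- pairs and emitting the head of each maximal run of equal modes (run-skipping loop);
-- objective: alternative decomposition, same cost.

-- mode lookup frames[f].get('mode', '?') (shared expression of both Python versions)
def pvMode (frames : List (Int × List (String × String))) (f : Int) : String :=
  PySem.Dict.getD (PySem.Dict.ofList ((PySem.Dict.ofList frames).getD f [])) "mode" "?"

-- ===== PORT A =====
-- A's for-loop over sorted keys with the `transitions` accumulator and `prev_mode`
def pvLoopA (frames : List (Int × List (String × String))) :
    List Int → List (Int × String) → Option String → List (Int × String)
  | [], acc, _ => acc
  | f :: fs, acc, prev =>
    let mode := pvMode frames f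
    if some mode ≠ prev then pvLoopA frames fs (acc ++ [(f, mode)]) (some mode)
    else pvLoopA frames fs acc prev

def extract_mode_transitions_py (frames : List (Int × List (String × String))) : List (Int × String) :=
  pvLoopA frames (PySem.List.sorted ((PySem.Dict.ofList frames).keys) (fun x => x) false) [] none

-- ===== PORT B =====
-- B's outer/inner while loops: emit pairs[i], then skip the run of equal modes
def pvEmitRuns : List (Int × String) → List (Int × String)
  | [] => []
  | p :: rest => p :: pvEmitRuns (rest.dropWhile (fun q => q.2 == p.2))
  termination_by l => l.length
  decreasing_by
    have := List.length_dropWhile_le (fun q => q.2 == p.2) rest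
    simp; omega

def extract_mode_transitions_py_alt (frames : List (Int × List (String × String))) : List (Int × String) :=
  pvEmitRuns ((PySem.List.sorted ((PySem.Dict.ofList frames).keys) (fun x => x) false).map
    (fun f => (f, pvMode frames f)))

-- ===== PRECONDITION & SPEC =====
def Spec_extract_mode_transitions_py (frames : List (Int × List (String × String))) (out : List (Int × String)) : Prop := out = extract_mode_transitions_py_alt frames
instance (frames : List (Int × List (String × String))) (out : List (Int × String)) : Decidable (Spec_extract_mode_transitions_py frames out) := by unfold Spec_extract_mode_transitions_py; infer_instance

-- ===== CLAIM (what is proved, stated in full; the proofs are below) =====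
def Claim_equal_extract_mode_transitions_py : Prop := ∀ (frames : List (Int × List (String × String))), Dom_extract_mode_transitions_py frames → Spec_extract_mode_transitions_py frames (extract_mode_transitions_py frames)

-- ===== LEMMAS AND PROOFS =====

-- A's loop over key/mode pairs, without the accumulator
def pvLoA : List (Int × String) → Option String → List (Int × String)
  | [], _ => []
  | (f, m) :: rest, prev =>
    if some m ≠ prev then (f, m) :: pvLoA rest (some m) else pvLoA rest prev

theorem pvLoopA_eq (frames : List (Int × List (String × String))) :
    ∀ (ks : List Int) (acc : List (Int × String)) (prev : Option String),
      pvLoopA frames ks acc prev = acc ++ pvLoA (ks.map (fun f => (f, pvMode frames f))) prev := by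
  intro ks
  induction ks with
  | nil => intro acc prev; simp [pvLoopA, pvLoA]
  | cons f fs ih =>
    intro acc prev
    simp only [pvLoopA, pvLoA, List.map]
    split
    · rw [ih]; simp
    · rw [ih]

theorem pvLoA_emit : ∀ (ps : List (Int × String)),
    pvLoA ps none = pvEmitRuns ps ∧
    ∀ m : String, pvLoA ps (some m) = pvEmitRuns (ps.dropWhile (fun q => q.2 == m)) := by
  intro ps
  induction ps with
  | nil => simp [pvLoA, pvEmitRuns]
  | cons p rest ih =>
    obtain ⟨f, m0⟩ := p
    constructor
    · simp only [pvLoA, pvEmitRuns]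
      rw [if_pos (by simp)]
      simp [ih.2 m0]
    · intro m
      by_cases h : m0 = m
      · subst h
        simp only [pvLoA]
        rw [if_neg (by simp)]
        rw [List.dropWhile_cons_of_pos (by simp)]
        exact ih.2 m0
      · simp only [pvLoA]
        rw [if_pos (by simp [h])]
        rw [List.dropWhile_cons_of_neg (by simp [h])]
        simp only [pvEmitRuns]
        simp [ih.2 m0]

-- ===== VERDICT (by name: the statement is the Claim_ definition above) =====
theorem extract_mode_transitions_py_spec : Claim_equal_extract_mode_transitions_py := by
  intro frames _
  unfold Spec_extract_mode_transitions_py extract_mode_transitions_py extract_mode_transitions_py_alt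
  rw [pvLoopA_eq]
  simp [(pvLoA_emit _).1]
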